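-- pv_equiv track=rewrite | github.com/KerimDundar/NobetciProgram | desktop_app/roster_logic.py | rotate_roster
-- ===== SOURCE A (Python) =====
-- from typing import List, Optional, Tuple
--
-- def rotate_roster(roster: List[List[str]]) -> List[List[str]]:
--     """
--     Rotate teacher names per day column, preserving empty slots.
--     roster: list of rows, each row is a list of 5 day values.
--     """
--     if not roster:
--         return []
--
--     rows = len(roster)
--     cols = 5
--     new_roster = [row[:] for row in roster]
--
--     for c in range(cols):
--         indices = [r for r in range(rows) if (roster[r][c] or "").strip()]
--         names = [roster[r][c] for r in indices]
--         if not names: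
--             continue
--         rotated = names[1:] + names[:1]
--         for r, name in zip(indices, rotated):
--             new_roster[r][c] = name
--
--     return new_roster
-- ===== SOURCE B (Python) =====
-- from typing import List
--
-- def rotate_roster(roster: List[List[str]]) -> List[List[str]]:
--     """Single top-to-bottom pointer pass per column instead of building
--     index/name lists and a rotated copy."""
--     new_roster = [row[:] for row in roster]
--     for c in range(5):
--         first_val = None
--         prev_idx = 0
--         for r in range(len(roster)):
--             cell = roster[r][c]
--             if not (cell or "").strip():
--                 continue
--             if first_val is None:
--                 first_val = cell
--             else:
--                 new_roster[prev_idx][c] = cell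
--             prev_idx = r
--         if first_val is not None:
--             new_roster[prev_idx][c] = first_val
--     return new_roster
-- ===== Notes on version B (the rewrite author's own statement) =====
-- stated objective: alternative
-- what changed: Replaces A's per-column build of an indices list, a names list and a rotated copy (slice concatenation + zip write-back) with a single top-to-bottom pointer pass per column that tracks first_val/prev_idx and writes each later non-empty cell into the previous non-empty slot.
import Mathlib
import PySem

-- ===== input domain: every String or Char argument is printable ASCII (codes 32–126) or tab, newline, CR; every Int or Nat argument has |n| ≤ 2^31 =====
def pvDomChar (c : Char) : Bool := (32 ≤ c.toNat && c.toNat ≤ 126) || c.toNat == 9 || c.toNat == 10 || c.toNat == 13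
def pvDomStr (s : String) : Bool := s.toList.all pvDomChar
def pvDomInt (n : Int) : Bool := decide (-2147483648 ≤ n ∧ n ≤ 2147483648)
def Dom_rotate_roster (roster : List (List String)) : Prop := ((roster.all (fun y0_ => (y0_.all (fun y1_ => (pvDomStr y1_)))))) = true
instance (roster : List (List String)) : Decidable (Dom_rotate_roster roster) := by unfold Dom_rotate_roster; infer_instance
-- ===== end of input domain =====

-- B replaces A's per-column indices/names/rotated lists + zip write-back by one
-- top-to-bottom pointer pass per column (first_val / prev_idx); same return value.

-- shared primitive helpers: `new_roster[r][c] = v` and Python's `(s or "")`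
def pvWrite (nr : List (List String)) (r c : Nat) (v : String) : List (List String) :=
  nr.set r ((nr.getD r []).set c v)

def pvOr (s : String) : String := if s = "" then "" else s

-- ===== PORT A =====
-- one column step of A: build indices, names, rotated, then zip write-back
def aCol (roster : List (List String)) (nr : List (List String)) (c : Nat) : List (List String) :=
  let indices := (List.range roster.length).filter
    (fun r => PySem.Str.strip (pvOr ((roster.getD r []).getD c "")) != "")
  let names := indices.map (fun r => (roster.getD r []).getD c "")
  if names.isEmpty then nr
  else
    let rotated := names.drop 1 ++ names.take 1
    (indices.zip rotated).foldl (fun nr2 p => pvWrite nr2 p.1 c p.2) nr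

def rotate_roster (roster : List (List String)) : List (List String) :=
  if roster.isEmpty then []
  else (List.range 5).foldl (aCol roster) (roster.map (fun row => row))

-- ===== PORT B =====
-- one row step of B's pass: skip blank cells, remember first_val, write into prev_idx
def bStep (roster : List (List String)) (c : Nat)
    (st : Option String × Nat × List (List String)) (r : Nat) :
    Option String × Nat × List (List String) :=
  let cell := (roster.getD r []).getD c ""
  if PySem.Str.strip (pvOr cell) == "" then st
  else
    match st with
    | (none, _, acc) => (some cell, r, acc)
    | (some fv, prev, acc) => (some fv, r, pvWrite acc prev c cell)

-- one column of B: the pass, then the closing write of first_val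
def bCol (roster : List (List String)) (nr : List (List String)) (c : Nat) : List (List String) :=
  match (List.range roster.length).foldl (bStep roster c) (none, 0, nr) with
  | (none, _, acc) => acc
  | (some fv, prev, acc) => pvWrite acc prev c fv

def rotate_roster_alt (roster : List (List String)) : List (List String) :=
  (List.range 5).foldl (bCol roster) (roster.map (fun row => row))

-- ===== PRECONDITION & SPEC =====
-- Pre_ excludes exactly the inputs where Python raises IndexError: a row shorter than 5.
def Pre_rotate_roster (roster : List (List String)) : Prop :=
  ∀ row ∈ roster, 5 ≤ row.length
instance (roster : List (List String)) : Decidable (Pre_rotate_roster roster) := by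
  unfold Pre_rotate_roster; infer_instance

def pvWitness_rotate_roster : List (List String) :=
  [["a", "", "b", "c", "d"], ["", "x", " y ", "", ""]]

def Spec_rotate_roster (roster : List (List String)) (out : List (List String)) : Prop := out = rotate_roster_alt roster
instance (roster : List (List String)) (out : List (List String)) : Decidable (Spec_rotate_roster roster out) := by unfold Spec_rotate_roster; infer_instance

-- ===== CLAIM (what is proved, stated in full; the proofs are below) =====
def Claim_equal_rotate_roster : Prop := ∀ (roster : List (List String)), Dom_rotate_roster roster → Pre_rotate_roster roster → Spec_rotate_roster roster (rotate_roster roster)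

-- ===== LEMMAS AND PROOFS =====

-- bStep with the blank test already decided false
def bApply (roster : List (List String)) (c : Nat)
    (st : Option String × Nat × List (List String)) (r : Nat) :
    Option String × Nat × List (List String) :=
  match st with
  | (none, _, acc) => (some ((roster.getD r []).getD c ""), r, acc)
  | (some fv, prev, acc) => (some fv, r, pvWrite acc prev c ((roster.getD r []).getD c ""))

theorem bStep_eq (roster : List (List String)) (c : Nat)
    (st : Option String × Nat × List (List String)) (r : Nat) :
    bStep roster c st r =
      if PySem.Str.strip (pvOr ((roster.getD r []).getD c "")) == "" then st
      else bApply roster c st r := by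
  simp only [bStep, bApply]

theorem foldl_skip_filter (roster : List (List String)) (c : Nat) :
    ∀ (l : List Nat) (st : Option String × Nat × List (List String)),
      l.foldl (bStep roster c) st =
      (l.filter (fun r => !(PySem.Str.strip (pvOr ((roster.getD r []).getD c "")) == ""))).foldl
        (bApply roster c) st := by
  intro l
  induction l with
  | nil => intro st; simp
  | cons i t ih =>
    intro st
    rw [List.foldl_cons, bStep_eq, List.filter_cons]
    cases hq : (PySem.Str.strip (pvOr ((roster.getD i []).getD c "")) == "") with
    | true => rw [if_pos rfl]; simp only [Bool.not_true]; rw [ih]; rfl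
    | false => rw [if_neg (by simp)]; simp only [Bool.not_false]; rw [ih]; rfl

-- the pointer pass with a remembered first_val performs exactly the zip write-back
theorem pass_writes (roster : List (List String)) (c : Nat) :
    ∀ (l : List Nat) (fv : String) (prev : Nat) (nr : List (List String)),
      (match l.foldl (bApply roster c) (some fv, prev, nr) with
       | (none, _, acc) => acc
       | (some v, p, acc) => pvWrite acc p c v)
      = ((prev :: l).zip
          (l.map (fun r => (roster.getD r []).getD c "") ++ [fv])).foldl
          (fun nr2 p => pvWrite nr2 p.1 c p.2) nr := by
  intro l
  induction l with
  | nil => intro fv prev nr; rfl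
  | cons j t ih =>
    intro fv prev nr
    simp only [List.foldl_cons, bApply, List.map_cons, List.cons_append, List.zip_cons_cons]
    exact ih fv j (pvWrite nr prev c ((roster.getD j []).getD c ""))

theorem col_eq (roster : List (List String)) (nr : List (List String)) (c : Nat) :
    aCol roster nr c = bCol roster nr c := by
  unfold aCol bCol
  rw [foldl_skip_filter]
  have hpred : (fun r => !(PySem.Str.strip (pvOr ((roster.getD r []).getD c "")) == ""))
      = (fun r => PySem.Str.strip (pvOr ((roster.getD r []).getD c "")) != "") := rfl
  rw [hpred]
  cases hl : (List.range roster.length).filter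
      (fun r => PySem.Str.strip (pvOr ((roster.getD r []).getD c "")) != "") with
  | nil => simp
  | cons i t =>
    simp only [List.foldl_cons, bApply]
    rw [pass_writes]
    simp [List.map_cons]

-- ===== VERDICT (by name: the statement is the Claim_ definition above) =====
theorem rotate_roster_spec : Claim_equal_rotate_roster := by
  intro roster _ _
  unfold Spec_rotate_roster rotate_roster rotate_roster_alt
  cases roster with
  | nil => rfl
  | cons row rest =>
    simp only [List.isEmpty_cons, Bool.false_eq_true, if_false]
    have : aCol (row :: rest) = bCol (row :: rest) := by
      funext nr c; exact col_eq _ nr c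
    rw [this]
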